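-- pv_equiv track=rewrite | github.com/KonstFed/DiffIE | src/diffopenie/data/dataset.py | _is_label_continous
-- ===== SOURCE A (Python) =====
-- def _is_label_continous(labels: list[str], prefix: str) -> bool:
--     """Check if given label is continous"""
--     first_index = next((i for i, l in enumerate(labels) if l.startswith(prefix)), None)
--     last_index = next(
--         (i for i in range(len(labels) - 1, -1, -1) if labels[i].startswith(prefix)),
--         None,
--     )
--     if first_index is None or last_index is None:
--         return False
--     return all(lab.startswith(prefix) for lab in labels[first_index : last_index + 1])
-- ===== SOURCE B (Python) =====
-- def _is_label_continous(labels: list[str], prefix: str) -> bool: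
--     """Check if given label is continous"""
--     n = len(labels)
--     i = 0
--     # phase 1: seek the first matching label
--     while i < n and not labels[i].startswith(prefix):
--         i += 1
--     if i == n:
--         return False
--     # phase 2: skip the contiguous block of matching labels
--     while i < n and labels[i].startswith(prefix):
--         i += 1
--     # phase 3: no further label may match
--     while i < n:
--         if labels[i].startswith(prefix):
--             return False
--         i += 1
--     return True
-- ===== Notes on version B (the rewrite author's own statement) =====
-- stated objective: simpler
-- what changed: Replaces A's forward search + backward range search + slice re-scan by a single left-to-right three-phase scan (seek first match, skip the matching block, verify no later match), never computing indices of boundaries or a slice.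
import Mathlib
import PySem

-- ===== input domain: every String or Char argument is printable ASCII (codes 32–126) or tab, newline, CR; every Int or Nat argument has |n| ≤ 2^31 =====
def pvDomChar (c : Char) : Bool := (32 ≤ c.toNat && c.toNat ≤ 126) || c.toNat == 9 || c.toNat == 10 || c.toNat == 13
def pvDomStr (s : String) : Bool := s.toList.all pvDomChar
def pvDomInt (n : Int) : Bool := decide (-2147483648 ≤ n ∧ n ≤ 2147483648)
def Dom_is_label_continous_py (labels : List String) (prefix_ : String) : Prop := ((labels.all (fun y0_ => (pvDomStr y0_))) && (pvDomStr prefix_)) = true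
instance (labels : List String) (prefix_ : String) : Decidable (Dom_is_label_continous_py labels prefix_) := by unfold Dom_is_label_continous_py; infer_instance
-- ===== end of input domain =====

-- B replaces A's forward search + backward range search + slice re-scan by one
-- left-to-right three-phase scan (seek / skip / verify); objective: simpler.


-- ===== PORT A =====
-- labels[i].startswith(prefix) for an Int index i (none = IndexError, never hit: i is in range)
def pvAcheck (labels : List String) (prefix_ : String) (i : Int) : Bool :=
  match PySem.List.pyGet? labels i with
  | some l => PySem.Str.startswith l prefix_
  | none => false

def is_label_continous_py (labels : List String) (prefix_ : String) : Bool :=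
  let first_index : Option Int :=
    ((PySem.List.enumerate labels 0).find?
      (fun il => PySem.Str.startswith il.2 prefix_)).map (·.1)
  let last_index : Option Int :=
    (PySem.List.pyRange ((PySem.List.len labels) - 1) (-1) (-1)).find?
      (pvAcheck labels prefix_)
  match first_index, last_index with
  | some fi, some li =>
      (PySem.List.slice labels (some fi) (some (li + 1))).all
        (fun lab => PySem.Str.startswith lab prefix_)
  | _, _ => false

-- ===== PORT B =====
-- phase 3: no further label may match
def pvAltRest (prefix_ : String) : List String → Bool
  | [] => true
  | l :: xs => if PySem.Str.startswith l prefix_ then false else pvAltRest prefix_ xs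

-- phase 2: skip the contiguous block of matching labels, then phase 3
def pvAltSkip (prefix_ : String) : List String → Bool
  | [] => true
  | l :: xs =>
      if PySem.Str.startswith l prefix_ then pvAltSkip prefix_ xs
      else pvAltRest prefix_ (l :: xs)

-- phase 1: seek the first matching label (none found → False)
def pvAltSeek (prefix_ : String) : List String → Bool
  | [] => false
  | l :: xs =>
      if PySem.Str.startswith l prefix_ then pvAltSkip prefix_ xs
      else pvAltSeek prefix_ xs

def is_label_continous_py_alt (labels : List String) (prefix_ : String) : Bool :=
  pvAltSeek prefix_ labels

-- ===== PRECONDITION & SPEC =====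
def Spec_is_label_continous_py (labels : List String) (prefix_ : String) (out : Bool) : Prop := out = is_label_continous_py_alt labels prefix_
instance (labels : List String) (prefix_ : String) (out : Bool) : Decidable (Spec_is_label_continous_py labels prefix_ out) := by unfold Spec_is_label_continous_py; infer_instance

-- ===== CLAIM (what is proved, stated in full; the proofs are below) =====
def Claim_equal_is_label_continous_py : Prop := ∀ (labels : List String) (prefix_ : String), Dom_is_label_continous_py labels prefix_ → Spec_is_label_continous_py labels prefix_ (is_label_continous_py labels prefix_)

-- ===== LEMMAS AND PROOFS =====

-- proof-side: index of the first element satisfying p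
def pvFirstIdx? (p : α → Bool) : List α → Option Nat
  | [] => none
  | x :: xs => if p x then some 0 else (pvFirstIdx? p xs).map (· + 1)

-- proof-side: index of the last element satisfying p
def pvLastIdx? (p : α → Bool) : List α → Option Nat
  | [] => none
  | x :: xs =>
      match pvLastIdx? p xs with
      | some k => some (k + 1)
      | none => if p x then some 0 else none

theorem pvLastIdx?_eq_none_iff (p : α → Bool) (xs : List α) :
    pvLastIdx? p xs = none ↔ xs.any p = false := by
  induction xs with
  | nil => simp [pvLastIdx?]
  | cons x xs ih =>
      simp only [pvLastIdx?, List.any_cons]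
      rcases h : pvLastIdx? p xs with _ | k
      · rw [h] at ih; simp at ih
        by_cases hx : p x
        · simp [hx]
        · simp [hx]; exact ih
      · rw [h] at ih; simp at ih
        simp [ih]

theorem pvLastIdx?_append_singleton (p : α → Bool) (xs : List α) (y : α) :
    pvLastIdx? p (xs ++ [y]) = if p y then some xs.length else pvLastIdx? p xs := by
  induction xs with
  | nil => by_cases hy : p y <;> simp [pvLastIdx?, hy]
  | cons x xs ih =>
      simp only [List.cons_append, pvLastIdx?, ih]
      by_cases hy : p y <;> simp [hy]

-- A's first search characterized by pvFirstIdx?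
theorem pvFind_enumerate (p : α → Bool) (xs : List α) (s : Int) :
    ((PySem.List.enumerate xs s).find? (fun il => p il.2)).map (·.1)
      = (pvFirstIdx? p xs).map (fun (k : Nat) => s + (k : Int)) := by
  induction xs generalizing s with
  | nil => simp [PySem.List.enumerate_nil, pvFirstIdx?]
  | cons x xs ih =>
      rw [PySem.List.enumerate_cons]
      by_cases hx : p x
      · simp [List.find?_cons, hx, pvFirstIdx?]
      · simp only [List.find?_cons, hx, pvFirstIdx?, if_neg, Bool.false_eq_true,
          not_false_eq_true, ite_false]
        rw [ih]
        rcases pvFirstIdx? p xs with _ | k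
        · simp
        · simp; ring

-- general: find? only looks at members (not in core/Batteries/Mathlib as of this toolchain)
theorem pvFind?_congr {α : Type} (l : List α) (p q : α → Bool)
    (h : ∀ x ∈ l, p x = q x) : l.find? p = l.find? q := by
  induction l with
  | nil => rfl
  | cons x xs ih =>
      have hx := h x (List.mem_cons_self)
      by_cases hp : p x
      · rw [List.find?_cons_of_pos hp, List.find?_cons_of_pos (by rw [← hx]; exact hp)]
      · rw [List.find?_cons_of_neg hp,
          List.find?_cons_of_neg (by rw [← hx]; exact hp)]
        exact ih (fun x hm => h x (List.mem_cons_of_mem _ hm))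

-- A's backward search characterized by pvLastIdx?
theorem pvFind_backward (prefix_ : String) (xs : List String) :
    (PySem.List.pyRange ((PySem.List.len xs) - 1) (-1) (-1)).find? (pvAcheck xs prefix_)
      = (pvLastIdx? (fun l => PySem.Str.startswith l prefix_) xs).map
          (fun (k : Nat) => (k : Int)) := by
  induction xs using List.reverseRecOn with
  | nil => simp [pvLastIdx?, PySem.List.pyRange_neg_one_eq_nil]
  | append_singleton ys y ih =>
      have hlen : PySem.List.len (ys ++ [y]) - 1 = (ys.length : Int) := by
        simp [PySem.List.len_eq]
      rw [hlen, PySem.List.pyRange_neg_one_cons (by omega)]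
      have hget : PySem.List.pyGet? (ys ++ [y]) (ys.length : Int) = some y :=
        PySem.List.pyGet?_append_length ys [] y
      by_cases hy : PySem.Str.startswith y prefix_ = true
      · rw [List.find?_cons_of_pos (by simp [pvAcheck, hget]; simpa using hy)]
        rw [pvLastIdx?_append_singleton, if_pos hy]
        rfl
      · rw [List.find?_cons_of_neg (by simp [pvAcheck, hget]; simpa using hy)]
        rw [pvLastIdx?_append_singleton, if_neg hy]
        rw [← ih]
        have hlen2 : (ys.length : Int) - 1 = PySem.List.len ys - 1 := by
          simp [PySem.List.len_eq]
        rw [hlen2]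
        apply pvFind?_congr
        intro i hi
        rw [PySem.List.mem_pyRange_neg_one] at hi
        have h0 : 0 ≤ i := by omega
        have h1 : i.toNat < ys.length := by
          simp [PySem.List.len_eq] at hi; omega
        unfold pvAcheck
        rw [PySem.List.pyGet?_of_nonneg _ h0, PySem.List.pyGet?_of_nonneg _ h0,
          List.getElem?_append_left h1]

-- pvFirstIdx? is none exactly when nothing matches
theorem pvFirstIdx?_eq_none_iff {α : Type} (p : α → Bool) (xs : List α) :
    pvFirstIdx? p xs = none ↔ xs.any p = false := by
  induction xs with
  | nil => simp [pvFirstIdx?]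
  | cons x xs ih =>
      by_cases hx : p x <;> simp [pvFirstIdx?, hx, ih]

-- phase 3 returns true iff no remaining label matches
theorem pvAltRest_eq (prefix_ : String) (xs : List String) :
    pvAltRest prefix_ xs = !(xs.any (fun l => PySem.Str.startswith l prefix_)) := by
  induction xs with
  | nil => simp [pvAltRest]
  | cons x xs ih =>
      by_cases hx : PySem.Str.startswith x prefix_ <;> simp [pvAltRest, hx, ih]

-- phase 2+3 equal the "all of the prefix up to the last match" re-scan
theorem pvSkip_eq (prefix_ : String) (xs : List String) :
    (match pvLastIdx? (fun l => PySem.Str.startswith l prefix_) xs with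
     | some k => (xs.take (k + 1)).all (fun l => PySem.Str.startswith l prefix_)
     | none => true)
      = pvAltSkip prefix_ xs := by
  induction xs with
  | nil => rfl
  | cons y zs ih =>
      rcases h : pvLastIdx? (fun l => PySem.Str.startswith l prefix_) zs with _ | k <;>
        rw [h] at ih <;>
        by_cases hy : PySem.Str.startswith y prefix_ = true
      · -- last zs = none, p y
        simp only [pvLastIdx?, h, if_pos hy, List.take_succ_cons, List.take_zero,
          List.all_cons, List.all_nil, hy, Bool.and_true, pvAltSkip, if_pos hy]
        exact ih
      · -- last zs = none, ¬ p y
        simp only [pvLastIdx?, h, if_neg hy, pvAltSkip, pvAltRest, pvAltRest_eq]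
        rw [(pvLastIdx?_eq_none_iff _ _).mp h]
        simp
      · -- last zs = some k, p y
        simp only [pvLastIdx?, h, pvAltSkip, if_pos hy, List.take_succ_cons,
          List.all_cons, hy, Bool.true_and]
        exact ih
      · -- last zs = some k, ¬ p y
        have hz : zs.any (fun l => PySem.Str.startswith l prefix_) = true := by
          by_contra hc
          simp only [Bool.not_eq_true] at hc
          rw [← pvLastIdx?_eq_none_iff] at hc
          rw [h] at hc; cases hc
        simp only [pvLastIdx?, h, pvAltSkip, if_neg hy, List.take_succ_cons,
          List.all_cons, pvAltRest, if_neg hy, pvAltRest_eq, hz]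
        simp
        intro hcon
        exact absurd hcon (by simpa using hy)

-- the combinatorial core: first/last + slice re-scan equals the three-phase scan
theorem pvCore (prefix_ : String) (xs : List String) :
    (match pvFirstIdx? (fun l => PySem.Str.startswith l prefix_) xs,
           pvLastIdx? (fun l => PySem.Str.startswith l prefix_) xs with
     | some fi, some li =>
         ((xs.drop fi).take (li + 1 - fi)).all (fun l => PySem.Str.startswith l prefix_)
     | _, _ => false)
      = pvAltSeek prefix_ xs := by
  induction xs with
  | nil => rfl
  | cons l ls ih =>
      by_cases hl : PySem.Str.startswith l prefix_ = true
      · rw [pvAltSeek, if_pos hl, ← pvSkip_eq]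
        rcases h : pvLastIdx? (fun l => PySem.Str.startswith l prefix_) ls with _ | k
        · simp only [pvFirstIdx?, pvLastIdx?, h, hl, if_pos, if_true, List.drop_zero,
            List.take_succ_cons, List.take_zero, List.all_cons, List.all_nil,
            Bool.true_and, Bool.and_true]
        · simp only [pvFirstIdx?, pvLastIdx?, h, hl, if_pos, if_true, List.drop_zero,
            Nat.sub_zero]
          rw [show k + 1 + 1 = (k + 1) + 1 from rfl, List.take_succ_cons,
            List.all_cons, hl, Bool.true_and]
      · rw [pvAltSeek, if_neg hl, ← ih]
        rcases hf : pvFirstIdx? (fun l => PySem.Str.startswith l prefix_) ls with _ | fi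
        · have hlast : pvLastIdx? (fun l => PySem.Str.startswith l prefix_) ls = none :=
            (pvLastIdx?_eq_none_iff _ _).mpr ((pvFirstIdx?_eq_none_iff _ _).mp hf)
          simp only [pvFirstIdx?, pvLastIdx?, hf, hlast, if_neg hl, Option.map_none]
        · have hany : ls.any (fun l => PySem.Str.startswith l prefix_) = true := by
            by_contra hc
            simp only [Bool.not_eq_true] at hc
            rw [← pvFirstIdx?_eq_none_iff] at hc
            rw [hf] at hc; cases hc
          rcases hla : pvLastIdx? (fun l => PySem.Str.startswith l prefix_) ls with _ | li
          · rw [(pvLastIdx?_eq_none_iff _ _).mp hla] at hany; cases hany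
          · simp only [pvFirstIdx?, pvLastIdx?, hf, hla, if_neg hl, Option.map_some,
              List.drop_succ_cons]
            have harith : li + 1 + 1 - (fi + 1) = li + 1 - fi := by omega
            rw [harith]

-- ===== VERDICT (by name: the statement is the Claim_ definition above) =====
theorem is_label_continous_py_spec : Claim_equal_is_label_continous_py := by
  intro labels prefix_ _
  unfold Spec_is_label_continous_py is_label_continous_py is_label_continous_py_alt
  rw [pvFind_enumerate (fun l => PySem.Str.startswith l prefix_) labels 0,
    pvFind_backward prefix_ labels, ← pvCore prefix_ labels]
  rcases hf : pvFirstIdx? (fun l => PySem.Str.startswith l prefix_) labels with _ | fi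
  · rcases hla : pvLastIdx? (fun l => PySem.Str.startswith l prefix_) labels with _ | li
      <;> simp
  · rcases hla : pvLastIdx? (fun l => PySem.Str.startswith l prefix_) labels with _ | li
    · simp
    · simp only [Option.map_some]
      have hcast : (0 : Int) + (fi : Int) = (fi : Int) := by ring
      rw [hcast]
      have hslice : PySem.List.slice labels (some (fi : Int)) (some ((li : Int) + 1))
          = (labels.drop fi).take (li + 1 - fi) := by
        have : ((li : Int) + 1) = ((li + 1 : Nat) : Int) := by push_cast; ring
        rw [this, PySem.List.slice_natCast]
      rw [hslice]
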